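-- pv_equiv track=rewrite | github.com/GitHub-Traveler/codeforces | 1029/test.py | solve_cool_partition
-- ===== SOURCE A (Python) =====
-- def solve_cool_partition(arr):
--     n = len(arr)
--     if n == 0:
--         return 0
--
--     # Use dynamic programming with memoization
--     memo = {}
--
--     def dp(start_idx, required_set):
--         # Convert set to tuple for hashing
--         required_tuple = tuple(sorted(required_set))
--         if (start_idx, required_tuple) in memo:
--             return memo[(start_idx, required_tuple)]
--
--         if start_idx == n:
--             return 0
--
--         max_segments = 0
--         current_elements = set()
--
--         # Try all possible ending positions for current segment
--         for end_idx in range(start_idx, n):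
--             current_elements.add(arr[end_idx])
--
--             # Check if current segment contains all required elements from previous segment
--             if not required_set.issubset(current_elements):
--                 continue
--
--             # If this is the last position, we can end here
--             if end_idx == n - 1:
--                 max_segments = max(max_segments, 1)
--                 continue
--
--             # Check if we can form next segment (remaining elements must contain all current elements)
--             remaining_elements = set(arr[end_idx + 1 :])
--             if current_elements.issubset(remaining_elements):
--                 # This segment is valid, recurse for remaining array
--                 segments_after = dp(end_idx + 1, current_elements)
--                 max_segments = max(max_segments, 1 + segments_after)
--
--         memo[(start_idx, required_tuple)] = max_segments
--         return max_segments
--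
--     return dp(0, set())
-- ===== SOURCE B (Python) =====
-- def solve_cool_partition(arr):
--     n = len(arr)
--     if n == 0:
--         return 0
--     last = {}
--     for i, v in enumerate(arr):
--         last[v] = i
--     count = 0
--     required = set()
--     cur = set()
--     minlast = n
--     for i, v in enumerate(arr):
--         cur.add(v)
--         minlast = min(minlast, last[v])
--         if required <= cur and (i == n - 1 or minlast > i):
--             count += 1
--             required = cur
--             cur = set()
--             minlast = n
--     return count
-- ===== Notes on version B (the rewrite author's own statement) =====
-- stated objective: faster
-- what changed: A's memoized exponential DP over (position, required-value-set) states is replaced by a single greedy left-to-right pass that accumulates the current segment's distinct values and cuts at the earliest position where the previous segment's values are all present and every current value reoccurs later (checked in O(1) via a precomputed last-occurrence table); an exchange argument shows the earliest valid cut is optimal.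
import Mathlib
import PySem

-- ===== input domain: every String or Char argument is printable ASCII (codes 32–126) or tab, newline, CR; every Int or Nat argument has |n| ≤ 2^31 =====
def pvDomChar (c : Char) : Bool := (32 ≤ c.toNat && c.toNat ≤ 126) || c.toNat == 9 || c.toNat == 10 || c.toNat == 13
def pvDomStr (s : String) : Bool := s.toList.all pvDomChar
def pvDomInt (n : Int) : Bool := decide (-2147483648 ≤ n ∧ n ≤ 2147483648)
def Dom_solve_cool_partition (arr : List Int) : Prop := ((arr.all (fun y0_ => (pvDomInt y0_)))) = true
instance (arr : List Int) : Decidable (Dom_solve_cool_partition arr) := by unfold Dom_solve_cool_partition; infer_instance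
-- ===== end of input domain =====

-- B replaces A's exponential recursion over (position, required-set) states by one greedy
-- left-to-right pass that cuts each segment at the earliest valid position (objective: faster).

-- ===== PORT A =====
-- A's inner 'for end_idx in range(start_idx, n)' loop; 'dprec' is the recursive dp call.
-- (A's memo dict is a pure cache and changes no value; the port recurses directly, with a
-- fuel argument that is never exhausted on the calls solve_cool_partition makes.)
def dpLoop (arr : List Int) (dprec : Nat → PySem.Set Int → Int)
    (e : Nat) (required cur : PySem.Set Int) (maxseg : Int) : Int :=
  if _h : e < arr.length then
    let cur' := PySem.Set.add cur (arr.getD e 0)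
    let maxseg' :=
      if PySem.Set.issubset required cur' = false then maxseg
      else if e = arr.length - 1 then max maxseg 1
      else if PySem.Set.issubset cur' (PySem.Set.ofList (arr.drop (e + 1))) = true then
        max maxseg (1 + dprec (e + 1) cur')
      else maxseg
    dpLoop arr dprec (e + 1) required cur' maxseg'
  else maxseg
termination_by arr.length - e

-- A's 'def dp(start_idx, required_set)'
def dpA (arr : List Int) : Nat → Nat → PySem.Set Int → Int
  | 0, _, _ => 0
  | fuel + 1, start, required =>
    if start = arr.length then 0
    else dpLoop arr (fun s r => dpA arr fuel s r) start required PySem.Set.empty 0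

def solve_cool_partition (arr : List Int) : Int :=
  if arr.length = 0 then 0
  else dpA arr (arr.length + 1) 0 PySem.Set.empty

-- ===== PORT B =====
-- 'last = {}; for i, v in enumerate(arr): last[v] = i'
def buildLast (arr : List Int) : PySem.Dict Int Int :=
  (PySem.List.enumerate arr 0).foldl (fun d p => d.insert p.2 p.1) PySem.Dict.empty

-- B's main 'for i, v in enumerate(arr)' loop with state (count, required, cur, minlast).
def bLoop (arr : List Int) (last : PySem.Dict Int Int)
    (i : Nat) (count : Int) (required cur : PySem.Set Int) (minlast : Int) : Int :=
  if _h : i < arr.length then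
    let v := arr.getD i 0
    let cur' := PySem.Set.add cur v
    let ml' := min minlast (last.getD v 0)
    if PySem.Set.issubset required cur' = true ∧ (i = arr.length - 1 ∨ ml' > (i : Int)) then
      bLoop arr last (i + 1) (count + 1) cur' PySem.Set.empty (arr.length : Int)
    else
      bLoop arr last (i + 1) count required cur' ml'
  else count
termination_by arr.length - i

def solve_cool_partition_alt (arr : List Int) : Int :=
  if arr.length = 0 then 0
  else bLoop arr (buildLast arr) 0 0 PySem.Set.empty PySem.Set.empty (arr.length : Int)

-- ===== PRECONDITION & SPEC =====
def Spec_solve_cool_partition (arr : List Int) (out : Int) : Prop := out = solve_cool_partition_alt arr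
instance (arr : List Int) (out : Int) : Decidable (Spec_solve_cool_partition arr out) := by unfold Spec_solve_cool_partition; infer_instance

-- ===== CLAIM (what is proved, stated in full; the proofs are below) =====
def Claim_equal_solve_cool_partition : Prop := ∀ (arr : List Int), Dom_solve_cool_partition arr → Spec_solve_cool_partition arr (solve_cool_partition arr)

-- ===== LEMMAS AND PROOFS =====

-- seg arr s t = the list of elements arr[s:t] (indices [s, t))
def seg (arr : List Int) (s t : Nat) : List Int := (arr.drop s).take (t - s)

lemma seg_self (arr : List Int) (s : Nat) : seg arr s s = [] := by simp [seg]

lemma mem_seg (arr : List Int) (s t : Nat) (x : Int) :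
    x ∈ seg arr s t ↔ ∃ j : Nat, s ≤ j ∧ j < t ∧ j < arr.length ∧ arr.getD j 0 = x := by
  unfold seg
  constructor
  · intro h
    obtain ⟨i, hi, hx⟩ := List.mem_iff_getElem.1 h
    simp only [List.length_take, List.length_drop, lt_min_iff] at hi
    refine ⟨s + i, Nat.le_add_right _ _, by omega, by omega, ?_⟩
    rw [List.getD_eq_getElem _ _ (by omega)]
    simpa [List.getElem_take, List.getElem_drop] using hx
  · rintro ⟨j, hsj, hjt, hjl, hx⟩
    refine List.mem_iff_getElem.2 ⟨j - s, ?_, ?_⟩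
    · simp only [List.length_take, List.length_drop, lt_min_iff]; omega
    · rw [List.getElem_take, List.getElem_drop]
      rw [List.getD_eq_getElem _ _ hjl] at hx
      simpa [Nat.add_sub_cancel' hsj] using hx

lemma seg_to_length (arr : List Int) (s : Nat) : seg arr s arr.length = arr.drop s := by
  unfold seg
  apply List.take_of_length_le
  simp

lemma seg_succ (arr : List Int) (s e : Nat) (hse : s ≤ e) (hen : e < arr.length) :
    seg arr s (e + 1) = seg arr s e ++ [arr.getD e 0] := by
  unfold seg
  have h1 : e + 1 - s = (e - s) + 1 := by omega
  rw [h1, List.take_add_one]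
  congr 1
  have he : e - s < (arr.drop s).length := by simp; omega
  rw [List.getElem?_eq_getElem he]
  simp only [List.getElem_drop, Option.toList]
  rw [List.getD_eq_getElem _ _ (by omega)]
  congr 2
  omega

lemma seg_subset_drop (arr : List Int) (s t : Nat) : seg arr s t ⊆ arr.drop s :=
  List.take_subset _ _

lemma mem_drop_iff (arr : List Int) (s : Nat) (x : Int) :
    x ∈ arr.drop s ↔ ∃ j : Nat, s ≤ j ∧ j < arr.length ∧ arr.getD j 0 = x := by
  have := mem_seg arr s arr.length x
  rw [seg_to_length] at this
  rw [this]
  constructor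
  · rintro ⟨j, h1, h2, h3, h4⟩; exact ⟨j, h1, h3, h4⟩
  · rintro ⟨j, h1, h2, h3⟩; exact ⟨j, h1, h2, h2, h3⟩

inductive Chain (arr : List Int) : Nat → List Int → Nat → Prop
  | nil (R : List Int) : Chain arr arr.length R 0
  | cons (s t : Nat) (R : List Int) (k : Nat) (hst : s < t) (htn : t ≤ arr.length)
      (hR : R ⊆ seg arr s t) (htail : Chain arr t (seg arr s t) k) : Chain arr s R (k + 1)

lemma chain_mono (arr : List Int) (s : Nat) (R R' : List Int) (k : Nat)
    (hsub : R' ⊆ R) (h : Chain arr s R k) : Chain arr s R' k := by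
  cases h with
  | nil => exact Chain.nil R'
  | cons s t R k hst htn hR htail => exact Chain.cons s t R' k hst htn (hsub.trans hR) htail

lemma chain_length_zero (arr : List Int) (R : List Int) (k : Nat)
    (h : Chain arr arr.length R k) : k = 0 := by
  cases h with
  | nil => rfl
  | cons s t R k hst htn hR htail => omega

lemma chain_pos (arr : List Int) (s : Nat) (R : List Int) (k : Nat)
    (hs : s < arr.length) (h : Chain arr s R k) : 0 < k := by
  cases h with
  | nil => omega
  | cons => omega

lemma chain_sub_drop (arr : List Int) (s : Nat) (R : List Int) (k : Nat)
    (hs : s < arr.length) (h : Chain arr s R k) : R ⊆ arr.drop s := by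
  cases h with
  | nil => omega
  | cons s t R k hst htn hR htail => exact hR.trans (seg_subset_drop arr s t)

-- one single segment [s, n) is always a valid 1-chain
lemma chain_one (arr : List Int) (s : Nat) (R : List Int)
    (hs : s < arr.length) (hR : R ⊆ arr.drop s) : Chain arr s R 1 := by
  have h := Chain.cons (arr := arr) s arr.length R 0 hs le_rfl
    (by rwa [seg_to_length]) (by rw [seg_to_length]; exact Chain.nil _)
  exact h

def Reach (arr : List Int) (s : Nat) (R : List Int) (m : Int) : Prop :=
  0 ≤ m ∧ (m = 0 ∨ ∃ k : Nat, m = (k : Int) ∧ Chain arr s R k)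

lemma reach_max (arr : List Int) (s : Nat) (R : List Int) (a b : Int)
    (ha : Reach arr s R a) (hb : Reach arr s R b) : Reach arr s R (max a b) := by
  rcases le_total a b with h | h
  · rwa [max_eq_right h]
  · rwa [max_eq_left h]

lemma cur'_mem (arr : List Int) (s e : Nat) (cur : List Int) (hse : s ≤ e) (he : e < arr.length)
    (hcur : ∀ x, x ∈ cur ↔ x ∈ seg arr s e) :
    ∀ x, x ∈ PySem.Set.add cur (arr.getD e 0) ↔ x ∈ seg arr s (e + 1) := by
  intro x
  rw [PySem.Set.mem_add, seg_succ arr s e hse he]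
  simp [hcur x]

lemma dpLoop_sound (arr : List Int) (f : Nat → PySem.Set Int → Int) (s : Nat) (R : List Int)
    (hs : s < arr.length)
    (Hf : ∀ s' R', s < s' → s' ≤ arr.length →
      0 ≤ f s' R' ∧ (f s' R' = 0 ∨ ∃ k : Nat, f s' R' = (k : Int) ∧ Chain arr s' R' k)) :
    ∀ e cur m, s ≤ e →
      (∀ x, x ∈ cur ↔ x ∈ seg arr s e) → Reach arr s R m →
      Reach arr s R (dpLoop arr f e R cur m) := by
  have main : ∀ d e cur m, arr.length - e ≤ d → s ≤ e →
      (∀ x, x ∈ cur ↔ x ∈ seg arr s e) → Reach arr s R m →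
      Reach arr s R (dpLoop arr f e R cur m) := by
    intro d
    induction d with
    | zero =>
      intro e cur m hd hse hcur hm
      rw [dpLoop, dif_neg (by omega : ¬ e < arr.length)]
      exact hm
    | succ d IH =>
      intro e cur m hd hse hcur hm
      rw [dpLoop]
      by_cases he : e < arr.length
      · rw [dif_pos he]
        simp only []
        set cur' := PySem.Set.add cur (arr.getD e 0) with hc'
        have hcur' := cur'_mem arr s e cur hse he hcur
        apply IH (e + 1) cur' _ (by omega) (by omega) hcur'
        -- Reach of the updated maxseg
        split_ifs with h1 h2 h3
        · exact hm
        · -- e = n-1, subset holds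
          have hsub : R ⊆ cur' := by
            intro x hx
            exact (PySem.Set.issubset_iff _ _).1 (by revert h1; cases PySem.Set.issubset R cur' <;> simp) x hx
          refine reach_max arr s R _ _ hm ⟨by norm_num, Or.inr ⟨1, by norm_num, ?_⟩⟩
          refine chain_one arr s R hs ?_
          intro x hx
          exact seg_subset_drop arr s (e+1) ((hcur' x).1 (hsub hx))
        · -- recursion branch
          have hsub : R ⊆ cur' := by
            intro x hx
            exact (PySem.Set.issubset_iff _ _).1 (by revert h1; cases PySem.Set.issubset R cur' <;> simp) x hx
          refine reach_max arr s R _ _ hm ?_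
          obtain ⟨hg0, hg⟩ := Hf (e + 1) cur' (by omega) (by omega)
          rcases hg with hg | ⟨k, hk, hch⟩
          · rw [hg]
            refine ⟨by norm_num, Or.inr ⟨1, by norm_num, ?_⟩⟩
            refine chain_one arr s R hs ?_
            intro x hx
            exact seg_subset_drop arr s (e+1) ((hcur' x).1 (hsub hx))
          · refine ⟨by omega, Or.inr ⟨k + 1, by rw [hk]; push_cast; ring, ?_⟩⟩
            refine Chain.cons s (e + 1) R k (by omega) (by omega) ?_ ?_
            · intro x hx; exact (hcur' x).1 (hsub hx)
            · exact chain_mono arr (e+1) cur' _ k (fun x hx => (hcur' x).2 hx) hch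
        · exact hm
      · rw [dif_neg he]; exact hm
  intro e cur m
  exact main (arr.length - e) e cur m le_rfl

lemma dpLoop_ge_acc (arr : List Int) (f : Nat → PySem.Set Int → Int) (R : List Int) :
    ∀ e cur m, m ≤ dpLoop arr f e R cur m := by
  have main : ∀ d e cur m, arr.length - e ≤ d → m ≤ dpLoop arr f e R cur m := by
    intro d
    induction d with
    | zero =>
      intro e cur m hd
      rw [dpLoop, dif_neg (by omega : ¬ e < arr.length)]
    | succ d IH =>
      intro e cur m hd
      rw [dpLoop]
      by_cases he : e < arr.length
      · rw [dif_pos he]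
        simp only []
        refine le_trans ?_ (IH (e + 1) _ _ (by omega))
        split_ifs <;> simp
      · rw [dif_neg he]
  intro e cur m
  exact main (arr.length - e) e cur m le_rfl

lemma dpLoop_complete (arr : List Int) (f : Nat → PySem.Set Int → Int) (s t : Nat)
    (R : List Int) (k : Nat)
    (hst : s < t) (htn : t ≤ arr.length) (hR : R ⊆ seg arr s t)
    (htail : Chain arr t (seg arr s t) k)
    (Hf : ∀ s' R' k', s < s' → Chain arr s' R' k' → (k' : Int) ≤ f s' R') :
    ∀ e cur m, s ≤ e → e < t →
      (∀ x, x ∈ cur ↔ x ∈ seg arr s e) →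
      (k : Int) + 1 ≤ dpLoop arr f e R cur m := by
  have main : ∀ d e cur m, arr.length - e ≤ d → s ≤ e → e < t →
      (∀ x, x ∈ cur ↔ x ∈ seg arr s e) →
      (k : Int) + 1 ≤ dpLoop arr f e R cur m := by
    intro d
    induction d with
    | zero => intro e cur m hd hse het hcur; omega
    | succ d IH =>
      intro e cur m hd hse het hcur
      have he : e < arr.length := by omega
      rw [dpLoop, dif_pos he]
      simp only []
      set cur' := PySem.Set.add cur (arr.getD e 0) with hc'
      have hcur' := cur'_mem arr s e cur hse he hcur
      by_cases het1 : e + 1 < t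
      · exact IH (e + 1) cur' _ (by omega) (by omega) het1 hcur'
      · -- e + 1 = t : the candidate computed this step is ≥ k + 1
        have hteq : t = e + 1 := by omega
        have hRsub : PySem.Set.issubset R cur' = true := by
          rw [PySem.Set.issubset_iff]
          intro x hx
          exact (hcur' x).2 (hteq ▸ hR hx)
        rw [if_neg (by rw [hRsub]; simp)]
        refine le_trans ?_ (dpLoop_ge_acc arr f R (e + 1) cur' _)
        by_cases hlast : e = arr.length - 1
        · rw [if_pos hlast]
          have : t = arr.length := by omega
          have hk0 : k = 0 := chain_length_zero arr _ k (by rw [← this]; exact htail)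
          simp [hk0]
        · rw [if_neg hlast]
          have htl : t < arr.length := by omega
          have hkpos : 0 < k := chain_pos arr t _ k htl htail
          have hsegd : seg arr s t ⊆ arr.drop t := chain_sub_drop arr t _ k htl htail
          have hgate : PySem.Set.issubset cur' (PySem.Set.ofList (arr.drop (e + 1))) = true := by
            rw [PySem.Set.issubset_iff]
            intro x hx
            rw [PySem.Set.mem_ofList, ← hteq]
            exact hsegd (hteq ▸ (hcur' x).1 hx)
          rw [if_pos hgate]
          have hfk : (k : Int) ≤ f (e + 1) cur' := by
            refine Hf (e + 1) cur' k (by omega) ?_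
            exact chain_mono arr (e+1) _ cur' k (fun x hx => (hcur' x).1 hx) (hteq ▸ htail)
          have := le_max_right m (1 + f (e + 1) cur')
          omega
  intro e cur m hse het hcur
  exact main (arr.length - e) e cur m le_rfl hse het hcur

lemma dpA_correct (arr : List Int) :
    ∀ (fuel : Nat), ∀ (s : Nat) (R : List Int), arr.length - s ≤ fuel → s ≤ arr.length →
      Reach arr s R (dpA arr fuel s R) ∧
      (∀ k : Nat, Chain arr s R k → (k : Int) ≤ dpA arr fuel s R) := by
  intro fuel
  induction fuel with
  | zero =>
    intro s R hf hs
    have hsn : s = arr.length := by omega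
    constructor
    · exact ⟨le_rfl, Or.inl rfl⟩
    · intro k hch
      have := chain_length_zero arr R k (hsn ▸ hch)
      simp [dpA, this]
  | succ fuel IH =>
    intro s R hf hs
    by_cases hsn : s = arr.length
    · constructor
      · simp only [dpA, if_pos hsn]
        exact ⟨le_rfl, Or.inl rfl⟩
      · intro k hch
        have := chain_length_zero arr R k (hsn ▸ hch)
        simp [dpA, if_pos hsn, this]
    · have hslt : s < arr.length := by omega
      have hemp : ∀ x : Int, x ∈ (PySem.Set.empty : PySem.Set Int) ↔ x ∈ seg arr s s := by
        simp [PySem.Set.empty, seg_self]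
      constructor
      · simp only [dpA, if_neg hsn]
        refine dpLoop_sound arr _ s R hslt ?_ s PySem.Set.empty 0 le_rfl hemp ⟨le_rfl, Or.inl rfl⟩
        intro s' R' hss' hs'n
        exact ⟨((IH s' R' (by omega) hs'n).1).1, ((IH s' R' (by omega) hs'n).1).2⟩
      · intro k hch
        cases hch with
        | nil => omega
        | cons s t R k hst htn hR htail =>
          simp only [dpA, if_neg hsn]
          have : (k : Int) + 1 ≤ dpLoop arr (fun s r => dpA arr fuel s r) s R PySem.Set.empty 0 := by
            refine dpLoop_complete arr _ s t R k hst htn hR htail ?_ s PySem.Set.empty 0 le_rfl hst hemp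
            intro s' R' k' hss' hch'
            have hs'n : s' ≤ arr.length := by
              cases hch' with
              | nil => exact le_rfl
              | cons _ t' _ _ h1 h2 => omega
            exact (IH s' R' (by omega) hs'n).2 k' hch' 
          push_cast
          omega

lemma dpA_nonneg (arr : List Int) (fuel s : Nat) (R : List Int)
    (hf : arr.length - s ≤ fuel) (hs : s ≤ arr.length) : 0 ≤ dpA arr fuel s R :=
  ((dpA_correct arr fuel s R hf hs).1).1

lemma dpA_le (arr : List Int) (f1 f2 s : Nat) (R R' : List Int)
    (h1 : arr.length - s ≤ f1) (h2 : arr.length - s ≤ f2) (hs : s ≤ arr.length)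
    (hsub : ∀ x, x ∈ R' → x ∈ R) :
    dpA arr f1 s R ≤ dpA arr f2 s R' := by
  obtain ⟨⟨hn, hr⟩, _⟩ := dpA_correct arr f1 s R h1 hs
  rcases hr with h0 | ⟨k, hk, hch⟩
  · rw [h0]; exact dpA_nonneg arr f2 s R' h2 hs
  · rw [hk]
    exact (dpA_correct arr f2 s R' h2 hs).2 k (chain_mono arr s R R' k hsub hch)

lemma dpA_congr (arr : List Int) (fuel s : Nat) (R R' : List Int)
    (hf : arr.length - s ≤ fuel) (hs : s ≤ arr.length)
    (h : ∀ x, x ∈ R ↔ x ∈ R') : dpA arr fuel s R = dpA arr fuel s R' :=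
  le_antisymm (dpA_le arr fuel fuel s R R' hf hf hs (fun x hx => (h x).2 hx))
    (dpA_le arr fuel fuel s R' R hf hf hs (fun x hx => (h x).1 hx))

def ValidCut (arr : List Int) (s t : Nat) (R : List Int) : Prop :=
  R ⊆ seg arr s t ∧ (t = arr.length ∨ seg arr s t ⊆ arr.drop t)

lemma chain_first_cut (arr : List Int) (s : Nat) (R : List Int) (k : Nat)
    (h : Chain arr s R (k + 1)) :
    ∃ t, s < t ∧ t ≤ arr.length ∧ ValidCut arr s t R ∧ Chain arr t (seg arr s t) k := by
  cases h with
  | cons s t R k hst htn hR htail =>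
    refine ⟨t, hst, htn, ⟨hR, ?_⟩, htail⟩
    by_cases htn' : t = arr.length
    · exact Or.inl htn'
    · exact Or.inr (chain_sub_drop arr t _ k (by omega) htail)

lemma buildLast_append (xs : List Int) (x : Int) :
    buildLast (xs ++ [x]) = (buildLast xs).insert x (xs.length : Int) := by
  unfold buildLast
  rw [PySem.List.enumerate_append, List.foldl_append]
  simp [PySem.List.enumerate_cons, PySem.List.enumerate_nil]

lemma buildLast_spec (arr : List Int) (v : Int) (hv : v ∈ arr) :
    ∃ j : Nat, (buildLast arr).getD v 0 = (j : Int) ∧ j < arr.length ∧ arr.getD j 0 = v ∧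
      ∀ k : Nat, j < k → k < arr.length → arr.getD k 0 ≠ v := by
  induction arr using List.reverseRecOn with
  | nil => simp at hv
  | append_singleton xs x IH =>
    rw [buildLast_append]
    by_cases hvx : v = x
    · refine ⟨xs.length, ?_, by simp, ?_, ?_⟩
      · rw [PySem.Dict.getD_insert]
        simp [hvx]
      · rw [hvx, List.getD_eq_getElem _ _ (by simp)]
        simp
      · intro k hk1 hk2
        simp at hk2
        omega
    · have hvxs : v ∈ xs := by
        rcases List.mem_append.1 hv with h | h
        · exact h
        · simp at h; exact absurd h hvx
      obtain ⟨j, hj1, hj2, hj3, hj4⟩ := IH hvxs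
      refine ⟨j, ?_, by simp; omega, ?_, ?_⟩
      · rw [PySem.Dict.getD_insert, if_neg hvx]
        exact hj1
      · rw [List.getD_eq_getElem _ _ (by simp; omega), List.getElem_append_left hj2,
          ← List.getD_eq_getElem _ _ hj2]
        exact hj3
      · intro k hk1 hk2
        simp at hk2
        by_cases hkl : k < xs.length
        · rw [List.getD_eq_getElem _ _ (by simp; omega), List.getElem_append_left hkl,
            ← List.getD_eq_getElem _ _ hkl]
          exact hj4 k hk1 hkl
        · have : k = xs.length := by omega
          rw [this, List.getD_eq_getElem _ _ (by simp)]
          simpa using fun h => hvx h.symm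


lemma buildLast_gt_iff (arr : List Int) (v : Int) (i : Nat) (hv : v ∈ arr) :
    ((i : Int) < (buildLast arr).getD v 0) ↔ v ∈ arr.drop (i + 1) := by
  obtain ⟨j, hj1, hj2, hj3, hj4⟩ := buildLast_spec arr v hv
  rw [hj1, mem_drop_iff]
  constructor
  · intro h
    exact ⟨j, by exact_mod_cast Nat.succ_le_of_lt (by exact_mod_cast h), hj2, hj3⟩
  · rintro ⟨m, hm1, hm2, hm3⟩
    have : m ≤ j := by
      by_contra hc
      exact hj4 m (by omega) hm2 hm3
    have : i < j := by omega
    exact_mod_cast this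

lemma foldl_min_gt (f : Int → Int) (i : Int) :
    ∀ (l : List Int) (init : Int),
      (i < l.foldl (fun m v => min m (f v)) init ↔ i < init ∧ ∀ v ∈ l, i < f v) := by
  intro l
  induction l with
  | nil => simp
  | cons x xs IH =>
    intro init
    simp only [List.foldl_cons, IH, lt_min_iff, List.mem_cons]
    constructor
    · rintro ⟨⟨h1, h2⟩, h3⟩
      exact ⟨h1, fun v hv => by rcases hv with rfl | hv; exact h2; exact h3 v hv⟩
    · rintro ⟨h1, h2⟩
      exact ⟨⟨h1, h2 x (Or.inl rfl)⟩, fun v hv => h2 v (Or.inr hv)⟩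

lemma seg_mono_right (arr : List Int) (s t t' : Nat) (h : t ≤ t') : seg arr s t ⊆ seg arr s t' := by
  intro x hx
  rw [mem_seg] at hx ⊢
  obtain ⟨j, h1, h2, h3, h4⟩ := hx
  exact ⟨j, h1, by omega, h3, h4⟩

lemma seg_mono_left (arr : List Int) (s s' t : Nat) (h : s ≤ s') : seg arr s' t ⊆ seg arr s t := by
  intro x hx
  rw [mem_seg] at hx ⊢
  obtain ⟨j, h1, h2, h3, h4⟩ := hx
  exact ⟨j, by omega, h2, h3, h4⟩

lemma dp_least_n (arr : List Int) (s : Nat) (R : List Int)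
    (hs : s < arr.length) (hRd : R ⊆ arr.drop s)
    (hno : ∀ t, s < t → t < arr.length → ¬ ValidCut arr s t R) :
    dpA arr (arr.length + 1) s R = 1 := by
  have hc1 : (1 : Int) ≤ dpA arr (arr.length + 1) s R :=
    (dpA_correct arr _ s R (by omega) (by omega)).2 1 (chain_one arr s R hs hRd)
  obtain ⟨⟨hnn, hr⟩, _⟩ := dpA_correct arr (arr.length + 1) s R (by omega) (by omega)
  rcases hr with h0 | ⟨k, hk, hch⟩
  · omega
  · rw [hk] at hc1 ⊢
    norm_num
    have hk1 : 1 ≤ k := by exact_mod_cast hc1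
    obtain ⟨K, rfl⟩ : ∃ K, k = K + 1 := ⟨k - 1, by omega⟩
    obtain ⟨t, ht1, ht2, ht3, ht4⟩ := chain_first_cut arr s R K hch
    have htn : t = arr.length := by
      by_contra hc
      exact hno t ht1 (by omega) ht3
    have : K = 0 := chain_length_zero arr _ K (htn ▸ ht4)
    omega

lemma exchange (arr : List Int) (s t : Nat) (R : List Int)
    (hs : s < arr.length) (hst : s < t) (htn : t ≤ arr.length)
    (hRd : R ⊆ arr.drop s) (hv : ValidCut arr s t R)
    (hleast : ∀ t', s < t' → t' < t → ¬ ValidCut arr s t' R) :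
    dpA arr (arr.length + 1) s R = 1 + dpA arr (arr.length + 1) t (seg arr s t) := by
  set N := arr.length + 1 with hN
  have hg0 : 0 ≤ dpA arr N t (seg arr s t) := dpA_nonneg arr N t _ (by omega) htn
  apply le_antisymm
  · -- ≤ : decompose an optimal chain from s and exchange its first cut down to t
    obtain ⟨⟨hnn, hr⟩, _⟩ := dpA_correct arr N s R (by omega) (by omega)
    have hc1 : (1 : Int) ≤ dpA arr N s R :=
      (dpA_correct arr N s R (by omega) (by omega)).2 1 (chain_one arr s R hs hRd)
    rcases hr with h0 | ⟨k, hk, hch⟩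
    · omega
    · rw [hk] at hc1 ⊢
      have hk1 : 1 ≤ k := by exact_mod_cast hc1
      obtain ⟨K, rfl⟩ : ∃ K, k = K + 1 := ⟨k - 1, by omega⟩
      obtain ⟨t', ht1, ht2, ht3, ht4⟩ := chain_first_cut arr s R K hch
      have htt' : t ≤ t' := by
        by_contra hc
        exact hleast t' ht1 (by omega) ht3
      have hKle : (K : Int) ≤ dpA arr N t (seg arr s t) := by
        rcases Nat.eq_zero_or_pos K with hK0 | hKpos
        · simp [hK0]; exact hg0
        · obtain ⟨K', rfl⟩ : ∃ K', K = K' + 1 := ⟨K - 1, by omega⟩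
          obtain ⟨t2, h21, h22, h23, h24⟩ := chain_first_cut arr t' (seg arr s t') K' ht4
          refine (dpA_correct arr N t _ (by omega) htn).2 (K' + 1) ?_
          refine Chain.cons t t2 (seg arr s t) K' (by omega) h22 ?_ ?_
          · -- seg s t ⊆ seg t' t2 ⊆ seg t t2
            intro x hx
            exact seg_mono_left arr t t' t2 htt'
              (h23.1 (seg_mono_right arr s t t' htt' hx))
          · -- Chain t2 (seg t t2) K' from Chain t2 (seg t' t2) K'
            refine chain_mono arr t2 _ _ K' ?_ h24
            intro x hx
            rw [mem_seg] at hx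
            obtain ⟨j, hj1, hj2, hj3, hj4⟩ := hx
            by_cases hjt' : j < t'
            · exact h23.1 ((mem_seg arr s t' x).2 ⟨j, by omega, hjt', hj3, hj4⟩)
            · exact (mem_seg arr t' t2 x).2 ⟨j, by omega, hj2, hj3, hj4⟩
      push_cast
      omega
  · -- ≥ : prepend the segment [s, t) to an optimal chain from t
    obtain ⟨⟨hnn, hr⟩, _⟩ := dpA_correct arr N t (seg arr s t) (by omega) htn
    rcases hr with h0 | ⟨k, hk, hch⟩
    · rw [h0]
      norm_num
      exact (dpA_correct arr N s R (by omega) (by omega)).2 1 (chain_one arr s R hs hRd)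
    · rw [hk]
      have : ((k + 1 : Nat) : Int) ≤ dpA arr N s R :=
        (dpA_correct arr N s R (by omega) (by omega)).2 (k + 1)
          (Chain.cons s t R k hst htn hv.1 hch)
      push_cast at this ⊢
      omega

def mfold (arr : List Int) (l : List Int) : Int :=
  l.foldl (fun m v => min m ((buildLast arr).getD v 0)) (arr.length : Int)

lemma mfold_succ (arr : List Int) (s i : Nat) (hsi : s ≤ i) (hi : i < arr.length) :
    mfold arr (seg arr s (i + 1)) =
      min (mfold arr (seg arr s i)) ((buildLast arr).getD (arr.getD i 0) 0) := by
  unfold mfold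
  rw [seg_succ arr s i hsi hi, List.foldl_append]
  rfl

lemma mfold_gt_iff (arr : List Int) (s t : Nat) (i : Nat) (hi : i < arr.length) :
    ((i : Int) < mfold arr (seg arr s t)) ↔ seg arr s t ⊆ arr.drop (i + 1) := by
  unfold mfold
  rw [foldl_min_gt]
  constructor
  · rintro ⟨-, h⟩ x hx
    rw [← buildLast_gt_iff arr x i (List.drop_subset s arr (seg_subset_drop arr s t hx))]
    exact h x hx
  · intro h
    refine ⟨by exact_mod_cast hi, fun v hv => ?_⟩
    rw [buildLast_gt_iff arr v i (List.drop_subset s arr (seg_subset_drop arr s t hv))]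
    exact h hv

lemma bLoop_eq (arr : List Int) :
    ∀ (d i s : Nat) (R cur : List Int) (cnt : Int), arr.length - i ≤ d →
      s ≤ i → i < arr.length → R ⊆ arr.drop s →
      (∀ x, x ∈ cur ↔ x ∈ seg arr s i) →
      (∀ t, s < t → t ≤ i → ¬ ValidCut arr s t R) →
      bLoop arr (buildLast arr) i cnt R cur (mfold arr (seg arr s i)) =
        cnt + dpA arr (arr.length + 1) s R := by
  intro d
  induction d with
  | zero => intro i s R cur cnt hd hsi hin; omega
  | succ d IH =>
    intro i s R cur cnt hd hsi hin hRd hcur hno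
    rw [bLoop, dif_pos hin]
    simp only []
    set v := arr.getD i 0 with hv
    set cur' := PySem.Set.add cur v with hc'
    have hcur' := cur'_mem arr s i cur hsi hin hcur
    have hml' : min (mfold arr (seg arr s i)) ((buildLast arr).getD v 0) =
        mfold arr (seg arr s (i + 1)) := (mfold_succ arr s i hsi hin).symm
    rw [hml']
    have hsubIff : PySem.Set.issubset R cur' = true ↔ R ⊆ seg arr s (i + 1) := by
      rw [PySem.Set.issubset_iff]
      constructor
      · intro h x hx; exact (hcur' x).1 (h x hx)
      · intro h x hx; exact (hcur' x).2 (h hx)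
    have hmlIff : ((i : Int) < mfold arr (seg arr s (i + 1))) ↔
        seg arr s (i + 1) ⊆ arr.drop (i + 1) := mfold_gt_iff arr s (i + 1) i hin
    by_cases hg : PySem.Set.issubset R cur' = true ∧
        (i = arr.length - 1 ∨ mfold arr (seg arr s (i + 1)) > (i : Int))
    · rw [if_pos hg]
      have hRseg : R ⊆ seg arr s (i + 1) := hsubIff.1 hg.1
      have hvc : ValidCut arr s (i + 1) R := by
        refine ⟨hRseg, ?_⟩
        by_cases hlast : i + 1 = arr.length
        · exact Or.inl hlast
        · rcases hg.2 with h | h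
          · omega
          · exact Or.inr (hmlIff.1 h)
      by_cases hend : i + 1 = arr.length
      · -- final segment: loop ends, dp value is 1
        rw [bLoop, dif_neg (by omega : ¬ i + 1 < arr.length)]
        have : dpA arr (arr.length + 1) s R = 1 := by
          refine dp_least_n arr s R (by omega) hRd ?_
          intro t h1 h2
          exact hno t h1 (by omega)
        rw [this]
      · -- cut here, recurse on the next segment
        have hin1 : i + 1 < arr.length := by omega
        have hdrop : seg arr s (i + 1) ⊆ arr.drop (i + 1) := by
          rcases hg.2 with h | h
          · omega
          · exact hmlIff.1 h
        have hcurd : (cur' : List Int) ⊆ arr.drop (i + 1) := fun x hx => hdrop ((hcur' x).1 hx)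
        have hrec := IH (i + 1) (i + 1) cur' PySem.Set.empty (cnt + 1) (by omega) le_rfl hin1
          hcurd (by simp [PySem.Set.empty, seg_self]) (by intro t h1 h2; omega)
        rw [seg_self] at hrec
        have hmn : mfold arr [] = (arr.length : Int) := rfl
        rw [hmn] at hrec
        rw [hrec]
        have hcongr : dpA arr (arr.length + 1) (i + 1) cur' =
            dpA arr (arr.length + 1) (i + 1) (seg arr s (i + 1)) :=
          dpA_congr arr _ (i + 1) _ _ (by omega) (by omega) hcur'
        have hex := exchange arr s (i + 1) R (by omega) (by omega) (by omega) hRd hvc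
          (by intro t' h1 h2; exact hno t' h1 (by omega))
        rw [hcongr, hex]
        ring
    · rw [if_neg hg]
      -- the gate must pass at the last index, so we are not there yet
      have hend : i + 1 < arr.length := by
        by_contra hc
        have h1 : i = arr.length - 1 := by omega
        have h2 : R ⊆ seg arr s (i + 1) := by
          have : seg arr s (i + 1) = arr.drop s := by
            rw [(by omega : i + 1 = arr.length)]
            exact seg_to_length arr s
          rw [this]; exact hRd
        exact hg ⟨hsubIff.2 h2, Or.inl h1⟩
      refine IH (i + 1) s R cur' cnt (by omega) (by omega) hend hRd hcur' ?_
      intro t h1 h2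
      by_cases ht : t = i + 1
      · subst ht
        intro hvc
        rcases hvc.2 with h | h
        · omega
        · exact hg ⟨hsubIff.2 hvc.1, Or.inr (hmlIff.2 h)⟩
      · exact hno t h1 (by omega)


-- ===== VERDICT (by name: the statement is the Claim_ definition above) =====
theorem solve_cool_partition_spec : Claim_equal_solve_cool_partition := by
  intro arr _
  unfold Spec_solve_cool_partition solve_cool_partition solve_cool_partition_alt
  by_cases h0 : arr.length = 0
  · rw [if_pos h0, if_pos h0]
  · rw [if_neg h0, if_neg h0]
    have hb := bLoop_eq arr arr.length 0 0 PySem.Set.empty PySem.Set.empty 0 (by omega)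
      le_rfl (by omega) (by simp [PySem.Set.empty]) (by simp [PySem.Set.empty, seg_self])
      (by intro t h1 h2; omega)
    rw [seg_self] at hb
    have hmn : mfold arr [] = (arr.length : Int) := rfl
    rw [hmn] at hb
    rw [hb]
    ring
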